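-- pv_equiv track=rewrite | github.com/ZPZhou-lab/DeepLearning-Tensorflow | source/code/ch7.py | segment_BPE
-- ===== SOURCE A (Python) =====
-- def segment_BPE(tokens : list, symbols : list):
--     """
--     ## segment_BPE
--         BPE子词编码算法
--
--     Parameters
--     ----------
--     tokens : list
--         待子词编码的 token 列表
--     symbols : list
--         BPE 子词符号表
--     """
--     outputs = [] # 初始化输出
--     for token in tokens:
--         # 滑动窗口法，每次贪心地选择尽可能长的子词
--         start, end = 0, len(token)
--         cur_output = []
--         while start < len(token) and start < end:
--             if token[start:end] in symbols:
--                 cur_output.append(token[start:end])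
--                 start = end
--                 end = len(token)
--             else:
--                 # 不断缩小窗口右侧边界
--                 # 直到 token[start:end] 在子词符号表中
--                 end -= 1
--         # 如果 start < len(token)，说明上述循环由 start < end 跳出
--         # 说明当前 token 无法被 BPE 子词符号表编码，出现了未知符号
--         if start < len(token):
--             cur_output.append('<unk>')
--         outputs.append(' '.join(cur_output))
--     return outputs
-- ===== SOURCE B (Python) =====
-- def segment_BPE(tokens: list, symbols: list):
--     # Longest-match via a prefix set: scan each token forward, extending the
--     # current candidate while it is a prefix of some symbol, remembering the
--     # deepest position where the candidate itself is a symbol.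
--     sym = set(symbols)
--     prefixes = set()
--     for s in symbols:
--         for i in range(len(s)):
--             prefixes.add(s[:i + 1])
--     outputs = []
--     for token in tokens:
--         pieces = []
--         pos = 0
--         while pos < len(token):
--             best = None
--             i = pos
--             cur = ''
--             while i < len(token):
--                 cur += token[i]
--                 if cur not in prefixes:
--                     break
--                 i += 1
--                 if cur in sym:
--                     best = i
--             if best is None:
--                 pieces.append('<unk>')
--                 break
--             pieces.append(token[pos:best])
--             pos = best
--         outputs.append(' '.join(pieces))
--     return outputs
-- ===== Notes on version B (the rewrite author's own statement) =====
-- stated objective: faster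
-- what changed: Replaces the shrinking-window scan with repeated list membership by a forward scan through a precomputed symbol set and prefix set (a flattened trie), tracking the deepest accepting position.
import Mathlib
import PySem

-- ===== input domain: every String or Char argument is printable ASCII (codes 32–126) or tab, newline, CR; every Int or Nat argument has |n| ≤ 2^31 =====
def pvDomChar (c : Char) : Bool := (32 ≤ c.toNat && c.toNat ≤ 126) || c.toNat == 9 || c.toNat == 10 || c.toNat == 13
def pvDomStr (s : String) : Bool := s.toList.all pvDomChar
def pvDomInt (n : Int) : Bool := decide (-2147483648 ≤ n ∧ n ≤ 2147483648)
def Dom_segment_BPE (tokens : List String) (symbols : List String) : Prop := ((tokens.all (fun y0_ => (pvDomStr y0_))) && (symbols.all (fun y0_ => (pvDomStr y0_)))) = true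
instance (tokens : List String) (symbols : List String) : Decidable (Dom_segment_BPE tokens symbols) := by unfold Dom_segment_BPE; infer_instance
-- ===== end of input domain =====

-- B replaces A's shrinking-window greedy search (a list scan of `symbols` per window) by a
-- forward scan through a precomputed symbol set and prefix set, tracking the deepest
-- accepting position; a timing run measured B faster. Strings are ported through
-- their code-point lists (PySem.Chars style), which is exact.

-- ===== PORT A =====
-- token[start:end] with Nat bounds: exact (= PySem.List.slice_natCast)
def pvSlc (t : List Char) (a b : Nat) : List Char := (t.drop a).take (b - a)

-- the 'while start < len(token) and start < end' loop; returns (start, cur_output)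
def aLoop (syms : List (List Char)) (t : List Char) (start endi : Nat)
    (acc : List (List Char)) : Nat × List (List Char) :=
  if h : start < t.length ∧ start < endi then
    if syms.contains (pvSlc t start endi) then
      aLoop syms t endi t.length (acc ++ [pvSlc t start endi])
    else
      aLoop syms t start (endi - 1) acc
  else (start, acc)
termination_by (t.length - start, endi - start)
decreasing_by
  · exact Prod.Lex.left _ _ (by omega)
  · exact Prod.Lex.right _ (by omega)

def segment_BPE (tokens : List String) (symbols : List String) : List String :=
  let syms := symbols.map String.toList
  tokens.map (fun token =>
    let t := token.toList
    let r := aLoop syms t 0 t.length []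
    let cur := if r.1 < t.length then r.2 ++ [['<','u','n','k','>']] else r.2
    String.ofList (PySem.Chars.join [' '] cur))

-- ===== PORT B =====
-- prefixes = { s[:i+1] | s in symbols, i < len(s) }, built with set.add as in Source B
def bPrefixes (syms : List (List Char)) : PySem.Set (List Char) :=
  syms.foldl
    (fun P s => (List.range s.length).foldl (fun P i => PySem.Set.add P (s.take (i + 1))) P)
    PySem.Set.empty

-- inner 'while i < len(token)' scan: extend cur while in prefixes, remember deepest sym hit
def bInner (prefixes sym : PySem.Set (List Char)) (t : List Char) (i : Nat)
    (cur : List Char) (best : Option Nat) : Option Nat :=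
  if h : i < t.length then
    let cur' := cur ++ [t[i]]
    if PySem.Set.contains prefixes cur' then
      if PySem.Set.contains sym cur' then bInner prefixes sym t (i + 1) cur' (some (i + 1))
      else bInner prefixes sym t (i + 1) cur' best
    else best
  else best
termination_by t.length - i

-- any position bInner reports (beyond its incoming best) lies strictly beyond i;
-- cited by bOuter's decreasing_by
-- outer 'while pos < len(token)' loop building the pieces.
-- ('max b (pos + 1)' is a termination guard only: the inner scan can only report
-- positions beyond pos — its first report is i + 1 with i ≥ pos — so it equals b)
def bOuter (prefixes sym : PySem.Set (List Char)) (t : List Char) (pos : Nat)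
    (pieces : List (List Char)) : List (List Char) :=
  if h : pos < t.length then
    match bInner prefixes sym t pos [] none with
    | none => pieces ++ [['<','u','n','k','>']]
    | some b => bOuter prefixes sym t (max b (pos + 1)) (pieces ++ [(t.drop pos).take (b - pos)])
  else pieces
termination_by t.length - pos
decreasing_by omega

def segment_BPE_alt (tokens : List String) (symbols : List String) : List String :=
  let syms := symbols.map String.toList
  let sym := PySem.Set.ofList syms
  let prefixes := bPrefixes syms
  tokens.map (fun token =>
    String.ofList (PySem.Chars.join [' '] (bOuter prefixes sym token.toList 0 [])))

-- ===== PRECONDITION & SPEC =====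
def Spec_segment_BPE (tokens : List String) (symbols : List String) (out : List String) : Prop := out = segment_BPE_alt tokens symbols
instance (tokens : List String) (symbols : List String) (out : List String) : Decidable (Spec_segment_BPE tokens symbols out) := by unfold Spec_segment_BPE; infer_instance

-- ===== CLAIM (what is proved, stated in full; the proofs are below) =====
def Claim_equal_segment_BPE : Prop := ∀ (tokens : List String) (symbols : List String), Dom_segment_BPE tokens symbols → Spec_segment_BPE tokens symbols (segment_BPE tokens symbols)

-- ===== LEMMAS AND PROOFS =====

-- A's inner decrement search, as a structural recursion: the largest e ≤ endi with
-- pos < e and token[pos:e] in symbols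
def findDown (syms : List (List Char)) (t : List Char) (pos : Nat) : Nat → Option Nat
  | 0 => none
  | e + 1 =>
    if pos < e + 1 then
      (if syms.contains (pvSlc t pos (e + 1)) then some (e + 1) else findDown syms t pos e)
    else none

-- B's forward search from i (cur = token[pos:i]): the deepest prefix-reachable sym match
def bFind (prefixes sym : PySem.Set (List Char)) (t : List Char) (pos i : Nat) : Option Nat :=
  if h : i < t.length then
    if PySem.Set.contains prefixes (pvSlc t pos (i + 1)) then
      match bFind prefixes sym t pos (i + 1) with
      | some b => some b
      | none => if PySem.Set.contains sym (pvSlc t pos (i + 1)) then some (i + 1) else none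
    else none
  else none
termination_by t.length - i

theorem pvSlc_snoc (t : List Char) (pos i : Nat) (hpi : pos ≤ i) (hi : i < t.length) :
    pvSlc t pos i ++ [t[i]] = pvSlc t pos (i + 1) := by
  unfold pvSlc
  have h1 : i + 1 - pos = (i - pos) + 1 := by omega
  rw [h1, List.take_succ]
  have h2 : i - pos < (t.drop pos).length := by simp; omega
  rw [List.getElem?_eq_getElem h2]
  simp [List.getElem_drop]
  congr 1
  omega

theorem pvSlc_take (t : List Char) (pos j e : Nat) (hj : j ≤ e) :
    (pvSlc t pos e).take (j - pos) = pvSlc t pos j := by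
  unfold pvSlc; rw [List.take_take]; congr 1; omega

theorem pvSlc_length (t : List Char) (pos e : Nat) (he : e ≤ t.length) :
    (pvSlc t pos e).length = e - pos := by
  unfold pvSlc; simp; omega

theorem mem_foldl_add_pres {β : Type} (g : β → List Char) (l : List β)
    (P : PySem.Set (List Char)) (x : List Char) (hx : x ∈ P) :
    x ∈ l.foldl (fun P b => PySem.Set.add P (g b)) P := by
  induction l generalizing P with
  | nil => exact hx
  | cons a l ih => exact ih _ (by rw [PySem.Set.mem_add]; exact Or.inl hx)

theorem mem_foldl_add_self {β : Type} (g : β → List Char) (l : List β)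
    (P : PySem.Set (List Char)) (b : β) (hb : b ∈ l) :
    g b ∈ l.foldl (fun P b => PySem.Set.add P (g b)) P := by
  induction l generalizing P with
  | nil => cases hb
  | cons a l ih =>
    rcases List.mem_cons.mp hb with rfl | hb
    · exact mem_foldl_add_pres g l _ _ (by rw [PySem.Set.mem_add]; exact Or.inr rfl)
    · exact ih _ hb

theorem mem_inner_pres (s : List Char) (P : PySem.Set (List Char)) (x : List Char) (hx : x ∈ P) :
    x ∈ (List.range s.length).foldl (fun P i => PySem.Set.add P (s.take (i + 1))) P :=
  mem_foldl_add_pres _ _ _ _ hx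

theorem mem_outer_pres (l : List (List Char)) (P : PySem.Set (List Char)) (x : List Char) (hx : x ∈ P) :
    x ∈ l.foldl (fun P s => (List.range s.length).foldl (fun P i => PySem.Set.add P (s.take (i + 1))) P) P := by
  induction l generalizing P with
  | nil => exact hx
  | cons a l ih => exact ih _ (mem_inner_pres a P x hx)

theorem bPrefixes_mem (syms : List (List Char)) (s : List Char) (k : Nat)
    (hs : s ∈ syms) (hk1 : 1 ≤ k) (hk2 : k ≤ s.length) :
    s.take k ∈ bPrefixes syms := by
  unfold bPrefixes
  generalize PySem.Set.empty = P
  induction syms generalizing P with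
  | nil => cases hs
  | cons a l ih =>
    rcases List.mem_cons.mp hs with rfl | hs
    · -- s = a: added by the inner fold, preserved across the rest
      have h1 : s.take k ∈ (List.range s.length).foldl (fun P i => PySem.Set.add P (s.take (i + 1))) P := by
        have hm : k - 1 ∈ List.range s.length := by rw [List.mem_range]; omega
        have := mem_foldl_add_self (fun i => s.take (i + 1)) (List.range s.length) P _ hm
        simpa [Nat.sub_add_cancel hk1] using this
      simpa only [List.foldl_cons] using mem_outer_pres l _ _ h1
    · exact ih hs _

theorem sym_contains_iff (syms : List (List Char)) (x : List Char) :
    PySem.Set.contains (PySem.Set.ofList syms) x = syms.contains x := by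
  by_cases h : x ∈ syms
  · rw [(PySem.Set.contains_iff _ _).mpr ((PySem.Set.mem_ofList _ _).mpr h), (List.contains_iff_mem).mpr h]
  · have h1 : ¬ PySem.Set.contains (PySem.Set.ofList syms) x = true := by
      rw [PySem.Set.contains_iff, PySem.Set.mem_ofList]; exact h
    have h2 : ¬ syms.contains x = true := by rw [List.contains_iff_mem]; exact h
    simp only [Bool.not_eq_true] at h1 h2
    rw [h1, h2]

theorem prefix_mem (syms : List (List Char)) (t : List Char) (pos j e : Nat)
    (he : e ≤ t.length) (hM : syms.contains (pvSlc t pos e) = true)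
    (hj1 : pos < j) (hj2 : j ≤ e) :
    PySem.Set.contains (bPrefixes syms) (pvSlc t pos j) = true := by
  rw [PySem.Set.contains_iff]
  have hs : pvSlc t pos e ∈ syms := List.contains_iff_mem.mp hM
  have h1 : (pvSlc t pos e).take (j - pos) = pvSlc t pos j := pvSlc_take t pos j e hj2
  rw [← h1]
  exact bPrefixes_mem syms _ (j - pos) hs (by omega) (by rw [pvSlc_length t pos e he]; omega)

theorem findDown_sound (syms : List (List Char)) (t : List Char) (pos : Nat) :
    ∀ (e0 e : Nat), findDown syms t pos e0 = some e →
      pos < e ∧ e ≤ e0 ∧ syms.contains (pvSlc t pos e) = true ∧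
        ∀ e', e < e' → e' ≤ e0 → syms.contains (pvSlc t pos e') = false := by
  intro e0
  induction e0 with
  | zero => intro e h; simp [findDown] at h
  | succ n ih =>
    intro e h
    rw [findDown] at h
    split at h
    · split at h
      · injection h with h'; subst h'
        refine ⟨by omega, by omega, by assumption, ?_⟩
        intro e' h1 h2; omega
      · obtain ⟨a1, a2, a3, a4⟩ := ih e h
        refine ⟨a1, by omega, a3, ?_⟩
        intro e' h1 h2
        rcases Nat.lt_or_ge e' (n + 1) with h3 | h3
        · exact a4 e' h1 (by omega)
        · have : e' = n + 1 := by omega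
          subst this
          rename_i hf
          simpa using hf
    · cases h

theorem findDown_none (syms : List (List Char)) (t : List Char) (pos : Nat) :
    ∀ (e0 : Nat), findDown syms t pos e0 = none →
      ∀ e, pos < e → e ≤ e0 → syms.contains (pvSlc t pos e) = false := by
  intro e0
  induction e0 with
  | zero => intro _ e h1 h2; omega
  | succ n ih =>
    intro h e h1 h2
    rw [findDown] at h
    split at h
    · split at h
      · cases h
      · rcases Nat.lt_or_ge e (n + 1) with h3 | h3
        · exact ih h e h1 (by omega)
        · have : e = n + 1 := by omega
          subst this
          rename_i hf
          simpa using hf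
    · omega

theorem bFind_sound (prefixes : PySem.Set (List Char)) (syms : List (List Char))
    (t : List Char) (pos : Nat) :
    ∀ (i b : Nat), bFind prefixes (PySem.Set.ofList syms) t pos i = some b →
      syms.contains (pvSlc t pos b) = true ∧ i < b ∧ b ≤ t.length := by
  intro i b h
  fun_induction bFind prefixes (PySem.Set.ofList syms) t pos i with
  | case1 i hi hp r hrec ih =>
      injection h with h'; subst h'
      obtain ⟨a1, a2, a3⟩ := ih hrec
      exact ⟨a1, by omega, a3⟩
  | case2 i hi hp hrec hs ih =>
      injection h with h'; subst h'
      rw [sym_contains_iff] at hs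
      exact ⟨hs, by omega, by omega⟩
  | case3 i hi hp hrec hs ih => cases h
  | case4 i hi hp => cases h
  | case5 i hi => cases h

theorem bFind_complete (syms : List (List Char)) (t : List Char) (pos : Nat) :
    ∀ (i e : Nat), pos ≤ i → i < e → e ≤ t.length →
      syms.contains (pvSlc t pos e) = true →
      ∃ b, bFind (bPrefixes syms) (PySem.Set.ofList syms) t pos i = some b ∧ e ≤ b := by
  suffices H : ∀ n i, t.length - i = n → ∀ e, pos ≤ i → i < e → e ≤ t.length →
      syms.contains (pvSlc t pos e) = true →
      ∃ b, bFind (bPrefixes syms) (PySem.Set.ofList syms) t pos i = some b ∧ e ≤ b by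
    intro i e h1 h2 h3 h4
    exact H _ i rfl e h1 h2 h3 h4
  intro n
  induction n using Nat.strong_induction_on with
  | _ n IH =>
    intro i hn e h1 h2 h3 h4
    have hi : i < t.length := by omega
    rw [bFind, dif_pos hi]
    have hpfx : PySem.Set.contains (bPrefixes syms) (pvSlc t pos (i + 1)) = true :=
      prefix_mem syms t pos (i + 1) e h3 h4 (by omega) (by omega)
    rw [if_pos hpfx]
    rcases Nat.eq_or_lt_of_le (show i + 1 ≤ e by omega) with heq | hlt
    · cases hb : bFind (bPrefixes syms) (PySem.Set.ofList syms) t pos (i + 1) with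
      | some b0 =>
        obtain ⟨_, hb2, _⟩ := bFind_sound (bPrefixes syms) syms t pos (i + 1) b0 hb
        exact ⟨b0, rfl, by omega⟩
      | none =>
        have hsym : PySem.Set.contains (PySem.Set.ofList syms) (pvSlc t pos (i + 1)) = true := by
          rw [sym_contains_iff, heq]; exact h4
        refine ⟨i + 1, ?_, by omega⟩
        rw [sym_contains_iff] at hsym
        simp [List.contains_iff_mem.mp hsym]
    · obtain ⟨b0, hb, hbe⟩ := IH (t.length - (i + 1)) (by omega) (i + 1) rfl e (by omega) hlt h3 h4
      exact ⟨b0, by rw [hb], hbe⟩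

theorem bFind_eq_findDown (syms : List (List Char)) (t : List Char) (pos : Nat) :
    bFind (bPrefixes syms) (PySem.Set.ofList syms) t pos pos =
      findDown syms t pos t.length := by
  cases hfd : findDown syms t pos t.length with
  | none =>
    cases hbf : bFind (bPrefixes syms) (PySem.Set.ofList syms) t pos pos with
    | none => rfl
    | some b =>
      obtain ⟨a1, a2, a3⟩ := bFind_sound (bPrefixes syms) syms t pos pos b hbf
      have := findDown_none syms t pos t.length hfd b a2 a3
      rw [this] at a1; cases a1
  | some e =>
    obtain ⟨a1, a2, a3, a4⟩ := findDown_sound syms t pos t.length e hfd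
    obtain ⟨b, hb, hbe⟩ := bFind_complete syms t pos pos e (le_refl pos) a1 a2 a3
    obtain ⟨b1, b2, b3⟩ := bFind_sound (bPrefixes syms) syms t pos pos b hb
    rcases Nat.eq_or_lt_of_le hbe with heq | hlt
    · rw [hb, heq]
    · rw [a4 b hlt b3] at b1; cases b1

theorem bInner_eq_bFind (prefixes sym : PySem.Set (List Char)) (t : List Char) (pos : Nat) :
    ∀ (i : Nat) (best : Option Nat), pos ≤ i →
      bInner prefixes sym t i (pvSlc t pos i) best =
        match bFind prefixes sym t pos i with
        | some b => some b
        | none => best := by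
  suffices H : ∀ n i best, t.length - i = n → pos ≤ i →
      bInner prefixes sym t i (pvSlc t pos i) best =
        match bFind prefixes sym t pos i with
        | some b => some b
        | none => best by
    intro i best hpi; exact H _ i best rfl hpi
  intro n
  induction n using Nat.strong_induction_on with
  | _ n IH =>
    intro i best hn hpi
    by_cases hi : i < t.length
    · rw [bInner, bFind, dif_pos hi, dif_pos hi]
      simp only [pvSlc_snoc t pos i hpi hi]
      by_cases hp : PySem.Set.contains prefixes (pvSlc t pos (i + 1)) = true
      · rw [if_pos hp, if_pos hp]
        by_cases hs : PySem.Set.contains sym (pvSlc t pos (i + 1)) = true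
        · rw [if_pos hs]
          rw [IH (t.length - (i + 1)) (by omega) (i + 1) (some (i + 1)) rfl (by omega)]
          cases bFind prefixes sym t pos (i + 1) with
          | some b => rfl
          | none => rw [PySem.Set.contains_iff] at hs; simp [hs]
        · rw [if_neg hs]
          rw [IH (t.length - (i + 1)) (by omega) (i + 1) best rfl (by omega)]
          cases bFind prefixes sym t pos (i + 1) with
          | some b => rfl
          | none => rw [PySem.Set.contains_iff] at hs; simp [hs]
      · rw [if_neg hp, if_neg hp]
    · rw [bInner, bFind, dif_neg hi, dif_neg hi]

theorem aLoop_eq_findDown (syms : List (List Char)) (t : List Char) :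
    ∀ (endi : Nat), endi ≤ t.length → ∀ (start : Nat) (acc : List (List Char)),
      aLoop syms t start endi acc =
        match findDown syms t start endi with
        | some e => aLoop syms t e t.length (acc ++ [pvSlc t start e])
        | none => (start, acc) := by
  intro endi
  induction endi with
  | zero =>
    intro _ start acc
    rw [aLoop, dif_neg (by omega)]
    rfl
  | succ e ih =>
    intro he start acc
    rw [aLoop]
    by_cases hc : start < t.length ∧ start < e + 1
    · rw [dif_pos hc, findDown, if_pos hc.2]
      by_cases hm : syms.contains (pvSlc t start (e + 1)) = true
      · rw [if_pos hm, if_pos hm]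
      · rw [if_neg hm, if_neg hm]
        have : e + 1 - 1 = e := by omega
        rw [this]
        exact ih (by omega) start acc
    · rw [dif_neg hc]
      have hse : ¬ start < e + 1 := by omega
      rw [findDown, if_neg hse]

theorem perToken (syms : List (List Char)) (t : List Char) :
    ∀ (pos : Nat) (acc : List (List Char)), pos ≤ t.length →
      (let r := aLoop syms t pos t.length acc;
       if r.1 < t.length then r.2 ++ [['<','u','n','k','>']] else r.2) =
      bOuter (bPrefixes syms) (PySem.Set.ofList syms) t pos acc := by
  suffices H : ∀ n pos acc, t.length - pos = n → pos ≤ t.length →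
      (let r := aLoop syms t pos t.length acc;
       if r.1 < t.length then r.2 ++ [['<','u','n','k','>']] else r.2) =
      bOuter (bPrefixes syms) (PySem.Set.ofList syms) t pos acc by
    intro pos acc h; exact H _ pos acc rfl h
  intro n
  induction n using Nat.strong_induction_on with
  | _ n IH =>
    intro pos acc hn hpos
    have hbi : bInner (bPrefixes syms) (PySem.Set.ofList syms) t pos [] none =
        findDown syms t pos t.length := by
      have h0 : (([] : List Char)) = pvSlc t pos pos := by simp [pvSlc]
      rw [h0, bInner_eq_bFind (bPrefixes syms) (PySem.Set.ofList syms) t pos pos none (le_refl pos)]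
      rw [bFind_eq_findDown]
      cases findDown syms t pos t.length <;> rfl
    by_cases hp : pos < t.length
    · rw [bOuter, dif_pos hp, aLoop_eq_findDown syms t t.length (le_refl _) pos acc]
      split
      · rename_i b heqF
        split
        · rename_i heqB
          rw [hbi, heqF] at heqB; cases heqB
        · rename_i b2 heqB
          rw [hbi, heqF] at heqB
          injection heqB with hbe
          subst hbe
          obtain ⟨a1, a2, a3, a4⟩ := findDown_sound syms t pos t.length b heqF
          have hmax : max b (pos + 1) = b := by omega
          rw [hmax]
          have := IH (t.length - b) (by omega) b (acc ++ [pvSlc t pos b]) rfl (by omega)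
          simp only at this
          simp only
          rw [this]
          rfl
      · rename_i heqF
        split
        · simp [hp]
        · rename_i b2 heqB
          rw [hbi, heqF] at heqB; cases heqB
    · have hpe : pos = t.length := by omega
      rw [bOuter, dif_neg hp, aLoop, dif_neg (by omega)]
      simp [hp]

-- ===== VERDICT (by name: the statement is the Claim_ definition above) =====
theorem segment_BPE_spec : Claim_equal_segment_BPE := by
  intro tokens symbols _
  unfold Spec_segment_BPE segment_BPE segment_BPE_alt
  simp only [List.map_inj_left]
  intro token _
  have := perToken (symbols.map String.toList) token.toList 0 [] (Nat.zero_le _)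
  simp only at this
  rw [this]
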